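-- pv_equiv track=rewrite | github.com/TuringMachinegun/heteroclinic_simulator | examples/visualizer.py | next_sad
-- ===== SOURCE A (Python) =====
-- def next_sad(saddle, which):
--     """saddle is a string, which is a boolean telling which of the two
--     heteroclinic connection to follow. Returns new saddle.
--     """
--     s = list(saddle)
--     temp_s = ["x"] * 5
--     a_found = not which
--     for i, c in enumerate(s):
--         if c == "b":
--             temp_s[i] = "a"
--         elif c == "c":
--             temp_s[i] = "b"
--         elif c == "a":
--             if a_found:
--                 temp_s[i] = "b"
--             else:
--                 temp_s[i] = "c"
--             a_found = not a_found
--     return "".join(temp_s)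
-- ===== SOURCE B (Python) =====
-- def next_sad(saddle, which):
--     """Two-pass version: first map b->a, c->b and collect the positions of
--     a's; then assign each collected position b/c from its rank's parity."""
--     buf = ["x"] * 5
--     a_idx = []
--     for i, c in enumerate(saddle):
--         if c == "b":
--             buf[i] = "a"
--         elif c == "c":
--             buf[i] = "b"
--         elif c == "a":
--             a_idx.append(i)
--     j = 0
--     for i in a_idx:
--         buf[i] = "b" if (j % 2 == 1) == which else "c"
--         j += 1
--     return "".join(buf)
-- ===== Notes on version B (the rewrite author's own statement) =====
-- stated objective: alternative
-- what changed: Replaces A's single pass with an interleaved a_found toggle by two passes: the first rewrites b->a/c->b into the 5-slot buffer and collects the positions of 'a', the second fills each collected position with 'b' or 'c' computed from its rank's parity.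
import Mathlib
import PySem

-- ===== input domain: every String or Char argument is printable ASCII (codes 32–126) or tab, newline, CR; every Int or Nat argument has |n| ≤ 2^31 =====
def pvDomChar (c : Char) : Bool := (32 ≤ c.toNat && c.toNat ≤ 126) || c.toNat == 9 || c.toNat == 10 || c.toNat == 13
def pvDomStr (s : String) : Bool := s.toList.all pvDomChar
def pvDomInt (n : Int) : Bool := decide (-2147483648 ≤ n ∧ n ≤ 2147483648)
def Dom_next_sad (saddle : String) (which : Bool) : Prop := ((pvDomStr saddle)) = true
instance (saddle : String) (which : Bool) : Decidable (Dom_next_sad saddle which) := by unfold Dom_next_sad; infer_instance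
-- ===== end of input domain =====

-- B changes the decomposition: one pass rewrites b->a / c->b and collects a-positions, a second
-- pass assigns those positions b/c from rank parity, replacing A's interleaved toggle (objective: alternative).

-- ===== PORT A =====
-- loop body of A's single pass: buffer write plus the a_found toggle
def nextSadStepA (st : List Char × Bool) (p : Int × Char) : List Char × Bool :=
  if p.2 = 'b' then (PySem.List.pySetD st.1 p.1 'a', st.2)
  else if p.2 = 'c' then (PySem.List.pySetD st.1 p.1 'b', st.2)
  else if p.2 = 'a' then
    (PySem.List.pySetD st.1 p.1 (if st.2 then 'b' else 'c'), !st.2)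
  else st

def next_sad (saddle : String) (which : Bool) : String :=
  String.mk ((PySem.List.enumerate saddle.toList 0).foldl nextSadStepA
      (List.replicate 5 'x', !which)).1

-- ===== PORT B =====
-- first pass of B: rewrite b/c, collect a-positions
def nextSadStepB1 (st : List Char × List Int) (p : Int × Char) : List Char × List Int :=
  if p.2 = 'b' then (PySem.List.pySetD st.1 p.1 'a', st.2)
  else if p.2 = 'c' then (PySem.List.pySetD st.1 p.1 'b', st.2)
  else if p.2 = 'a' then (st.1, st.2 ++ [p.1])
  else st

-- second pass of B: fill each collected a-position from the rank counter j
def nextSadStepB2 (which : Bool) (st : List Char × Int) (i : Int) : List Char × Int :=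
  (PySem.List.pySetD st.1 i
      (if (decide (PySem.Int.mod st.2 2 = 1) == which) then 'b' else 'c'),
   st.2 + 1)

def next_sad_alt (saddle : String) (which : Bool) : String :=
  String.mk
    ((((PySem.List.enumerate saddle.toList 0).foldl nextSadStepB1
          (List.replicate 5 'x', [])).2).foldl (nextSadStepB2 which)
      (((PySem.List.enumerate saddle.toList 0).foldl nextSadStepB1
          (List.replicate 5 'x', [])).1, 0)).1

-- ===== PRECONDITION & SPEC =====
-- Pre_ excludes exactly the inputs on which Python A raises IndexError: an 'a'/'b'/'c'
-- at position ≥ 5 makes temp_s[i] = … raise (B raises there too).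
def Pre_next_sad (saddle : String) (which : Bool) : Prop :=
  ((saddle.toList.drop 5).all (fun c => decide (c ≠ 'a' ∧ c ≠ 'b' ∧ c ≠ 'c'))) = true
instance (saddle : String) (which : Bool) : Decidable (Pre_next_sad saddle which) := by
  unfold Pre_next_sad; infer_instance
def pvWitness_next_sad : String × Bool := ("abcab", false)

def Spec_next_sad (saddle : String) (which : Bool) (out : String) : Prop := out = next_sad_alt saddle which
instance (saddle : String) (which : Bool) (out : String) : Decidable (Spec_next_sad saddle which out) := by unfold Spec_next_sad; infer_instance

-- ===== CLAIM (what is proved, stated in full; the proofs are below) =====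
def Claim_equal_next_sad : Prop := ∀ (saddle : String) (which : Bool), Dom_next_sad saddle which → Pre_next_sad saddle which → Spec_next_sad saddle which (next_sad saddle which)

-- ===== LEMMAS AND PROOFS =====

-- the a_found accumulator of A as a function of the rank counter j of B
def nextSadBOf (which : Bool) (j : Int) : Bool :=
  decide (PySem.Int.mod j 2 = 1) == which

theorem nextSadBOf_zero (which : Bool) : nextSadBOf which 0 = !which := by
  cases which <;> simp [nextSadBOf, PySem.Int.mod]

theorem nextSadBOf_succ (which : Bool) (j : Int) :
    nextSadBOf which (j + 1) = !(nextSadBOf which j) := by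
  have h1 : PySem.Int.mod (j + 1) 2 = (j + 1) % 2 :=
    PySem.Int.mod_eq_emod_of_pos (by omega)
  have h2 : PySem.Int.mod j 2 = j % 2 := PySem.Int.mod_eq_emod_of_pos (by omega)
  rcases Int.emod_two_eq j with h | h <;>
    cases which <;>
    simp [nextSadBOf, h] <;>
    omega

-- B's first pass only appends to the index accumulator
theorem foldB1_acc (l : List (Int × Char)) (buf : List Char) (idxs : List Int) :
    l.foldl nextSadStepB1 (buf, idxs)
      = ((l.foldl nextSadStepB1 (buf, [])).1,
         idxs ++ (l.foldl nextSadStepB1 (buf, [])).2) := by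
  induction l generalizing buf idxs with
  | nil => simp
  | cons p l ih =>
    simp only [List.foldl_cons, nextSadStepB1, List.nil_append]
    split_ifs with h1 h2 h3
    · exact ih _ _
    · exact ih _ _
    · rw [ih _ (idxs ++ [p.1]), ih _ [p.1]]
      simp
    · exact ih _ _

-- the collected index list does not depend on the buffer
theorem foldB1_snd_congr (l : List (Int × Char)) (buf buf' : List Char) (idxs : List Int) :
    (l.foldl nextSadStepB1 (buf, idxs)).2 = (l.foldl nextSadStepB1 (buf', idxs)).2 := by
  induction l generalizing buf buf' idxs with
  | nil => rfl
  | cons p l ih =>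
    simp only [List.foldl_cons, nextSadStepB1]
    split_ifs <;> exact ih _ _ _

-- a write at an index not touched later commutes out of B's first pass
theorem foldB1_set_comm (l : List (Int × Char)) (buf : List Char) (idxs : List Int)
    (i : Int) (v : Char) (hi : 0 ≤ i) (hmem : i ∉ l.map Prod.fst)
    (hpos : ∀ p ∈ l, 0 ≤ p.1) :
    (l.foldl nextSadStepB1 (PySem.List.pySetD buf i v, idxs)).1
      = PySem.List.pySetD ((l.foldl nextSadStepB1 (buf, idxs)).1) i v := by
  induction l generalizing buf idxs with
  | nil => rfl
  | cons p l ih =>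
    have hp : 0 ≤ p.1 := hpos p (by simp)
    have hne : i ≠ p.1 := by simp at hmem; tauto
    have hmem' : i ∉ l.map Prod.fst := by simp at hmem ⊢; tauto
    have hpos' : ∀ q ∈ l, 0 ≤ q.1 := fun q hq => hpos q (by simp [hq])
    have hcomm : ∀ w : Char,
        PySem.List.pySetD (PySem.List.pySetD buf i v) p.1 w
          = PySem.List.pySetD (PySem.List.pySetD buf p.1 w) i v := by
      intro w
      rw [PySem.List.pySetD_of_nonneg _ _ hi, PySem.List.pySetD_of_nonneg _ _ hp,
          PySem.List.pySetD_of_nonneg _ _ hp, PySem.List.pySetD_of_nonneg _ _ hi]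
      exact List.set_comm _ _ (by omega)
    simp only [List.foldl_cons, nextSadStepB1]
    split_ifs with h1 h2 h3
    · rw [show (PySem.List.pySetD (PySem.List.pySetD buf i v) p.1 'a', idxs)
            = (PySem.List.pySetD (PySem.List.pySetD buf p.1 'a') i v, idxs) by rw [hcomm]]
      exact ih _ _ hmem' hpos'
    · rw [show (PySem.List.pySetD (PySem.List.pySetD buf i v) p.1 'b', idxs)
            = (PySem.List.pySetD (PySem.List.pySetD buf p.1 'b') i v, idxs) by rw [hcomm]]
      exact ih _ _ hmem' hpos'
    · exact ih _ _ hmem' hpos'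
    · exact ih _ _ hmem' hpos'

-- main invariant: A's single pass equals B's first pass followed by the rank pass
theorem nextSad_main (which : Bool) (l : List (Int × Char)) (buf : List Char) (j : Int)
    (hj : 0 ≤ j) (hpos : ∀ p ∈ l, 0 ≤ p.1) (hnd : (l.map Prod.fst).Nodup) :
    (l.foldl nextSadStepA (buf, nextSadBOf which j)).1
      = (((l.foldl nextSadStepB1 (buf, [])).2).foldl (nextSadStepB2 which)
          ((l.foldl nextSadStepB1 (buf, [])).1, j)).1 := by
  induction l generalizing buf j with
  | nil => rfl
  | cons p l ih =>
    have hp : 0 ≤ p.1 := hpos p (by simp)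
    have hpos' : ∀ q ∈ l, 0 ≤ q.1 := fun q hq => hpos q (by simp [hq])
    have hnd' : (l.map Prod.fst).Nodup := by simp at hnd; exact hnd.2
    have hmem : p.1 ∉ l.map Prod.fst := by simp at hnd; simpa using hnd.1
    simp only [List.foldl_cons, nextSadStepA, nextSadStepB1]
    by_cases h1 : p.2 = 'b'
    · simp only [if_pos h1]
      exact ih _ _ hj hpos' hnd'
    · by_cases h2 : p.2 = 'c'
      · simp only [if_neg h1, if_pos h2]
        exact ih _ _ hj hpos' hnd'
      · by_cases h3 : p.2 = 'a'
        · -- the 'a' branch: the deferred write surfaces at rank j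
          simp only [if_neg h1, if_neg h2, if_pos h3, List.nil_append]
          rw [foldB1_acc l buf [p.1]]
          rw [show (!nextSadBOf which j) = nextSadBOf which (j + 1) from
                (nextSadBOf_succ which j).symm]
          have hch : (if nextSadBOf which j then 'b' else 'c')
              = (if (decide (PySem.Int.mod j 2 = 1) == which) then 'b' else 'c') := rfl
          rw [hch]
          set ch := (if (decide (PySem.Int.mod j 2 = 1) == which) then 'b' else 'c')
            with hchdef
          have := ih (PySem.List.pySetD buf p.1 ch) (j + 1) (by omega) hpos' hnd'
          rw [this, foldB1_set_comm l buf [] p.1 ch hp hmem hpos',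
              foldB1_snd_congr l (PySem.List.pySetD buf p.1 ch) buf []]
          simp only [List.singleton_append, List.foldl_cons, nextSadStepB2]
          rfl
        · simp only [if_neg h1, if_neg h2, if_neg h3]
          exact ih _ _ hj hpos' hnd'

theorem nextSad_enumerate_pos (xs : List Char) :
    ∀ p ∈ PySem.List.enumerate xs 0, 0 ≤ p.1 := by
  intro p hp
  rcases (PySem.List.mem_enumerate_iff _ _ _).1 hp with ⟨k, hk, rfl⟩
  simp

theorem nextSad_enumerate_nodup (xs : List Char) :
    ((PySem.List.enumerate xs 0).map Prod.fst).Nodup := by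
  have h := PySem.List.pairwise_lt_enumerate xs 0
  have : ((PySem.List.enumerate xs 0).map Prod.fst).Pairwise (· < ·) :=
    List.pairwise_map.2 (h.imp (fun hpq => hpq))
  exact this.nodup

-- ===== VERDICT (by name: the statement is the Claim_ definition above) =====
theorem next_sad_spec : Claim_equal_next_sad := by
  intro saddle which _ _
  show next_sad saddle which = next_sad_alt saddle which
  unfold next_sad next_sad_alt
  rw [← nextSadBOf_zero which,
      nextSad_main which (PySem.List.enumerate saddle.toList 0) (List.replicate 5 'x') 0
        le_rfl (nextSad_enumerate_pos _) (nextSad_enumerate_nodup _)]
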